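-- pv_equiv track=rewrite | github.com/wakawaka121/Spring---2020 | Short PA 3/list_of_rows_0_on_bottom.py | build_rect
-- ===== SOURCE A (Python) =====
-- def add_top_bottom_element(width, j, elements):
--     """
--     This function takes 3 parameters to generate
--     the top and bottom elements of the grid.
--     width: is an int value that determines number
--     of elements in the list
--     j: is an int value that determines top or bottom
--     elements: is an empty list
--     """
--     if j == 0:
--         for i in range(width):
--             if i == 0:
--                 elements.append(" ")
--             elif i < width-1:
--                 elements.append("B")
--             elif i ==  (width -1):
--                 elements.append(" ")
--     else:
--         for i in range(width):
--             if i == 0: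
--                 elements.append(" ")
--             elif i < width-1:
--                 elements.append("T")
--             elif i == (width -1):
--                 elements.append(" ")
--
-- def build_rect(width, height):
--     """
--     This function takes two parameters to generate
--     a grid with dimensions width and height.
--     width: is an int value
--     height: is an int value
--     list_of_elements: gets returned
--     """
--     assert width >=3 and height >=3
--     list_of_elements = []
--     for j in range(height):
--         elements = []
--         if j == 0 or j == (height -1):
--             add_top_bottom_element(width, j, elements)
--             list_of_elements.append(elements)
--         else:
--             for i in range(width):
--                 if i == 0:
--                     elements.append("L")
--                 if i < (width-2):
--                     elements.append(".")
--                 if i == (width -1):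
--                     elements.append("R")
--             list_of_elements.append(elements)
--     return list_of_elements
-- ===== SOURCE B (Python) =====
-- def _row(left, fill, right, width):
--     return [left] + [fill] * (width - 2) + [right]
--
-- def build_rect(width, height):
--     assert width >= 3 and height >= 3
--     return ([_row(" ", "B", " ", width)]
--             + [_row("L", ".", "R", width) for _ in range(height - 2)]
--             + [_row(" ", "T", " ", width)])
-- ===== Notes on version B (the rewrite author's own statement) =====
-- stated objective: simpler
-- what changed: Replaces the per-cell conditional loops (and the top/bottom helper) with a closed-form row constructor: each row is built directly as [edge] + [fill]*(width-2) + [edge] and the grid as top + (height-2) interior rows + bottom, with no per-cell branching.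
import Mathlib
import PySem

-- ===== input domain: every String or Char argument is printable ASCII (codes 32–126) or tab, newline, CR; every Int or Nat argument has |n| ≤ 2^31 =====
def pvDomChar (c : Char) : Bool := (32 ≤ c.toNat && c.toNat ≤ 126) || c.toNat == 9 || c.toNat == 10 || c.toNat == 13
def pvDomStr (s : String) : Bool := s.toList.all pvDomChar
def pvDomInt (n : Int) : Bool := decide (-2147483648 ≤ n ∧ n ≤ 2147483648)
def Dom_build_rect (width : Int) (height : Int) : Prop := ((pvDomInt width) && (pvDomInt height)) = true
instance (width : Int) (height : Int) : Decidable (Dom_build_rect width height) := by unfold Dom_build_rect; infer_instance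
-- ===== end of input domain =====

-- B replaces A's per-cell conditional loops with a closed-form row builder ([edge] + fill*(w-2) + [edge]); same output, simpler.


-- ===== PORT A =====
def add_top_bottom_element (width : Int) (j : Int) (elements : List String) : List String :=
  if j == 0 then
    (PySem.List.pyRange 0 width 1).foldl (fun es i =>
      if i == 0 then es ++ [" "]
      else if i < width - 1 then es ++ ["B"]
      else if i == width - 1 then es ++ [" "]
      else es) elements
  else
    (PySem.List.pyRange 0 width 1).foldl (fun es i =>
      if i == 0 then es ++ [" "]
      else if i < width - 1 then es ++ ["T"]
      else if i == width - 1 then es ++ [" "]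
      else es) elements

def build_rect (width : Int) (height : Int) : List (List String) :=
  (PySem.List.pyRange 0 height 1).foldl (fun acc j =>
    let elements : List String := []
    if j == 0 || j == height - 1 then
      acc ++ [add_top_bottom_element width j elements]
    else
      acc ++ [(PySem.List.pyRange 0 width 1).foldl (fun es i =>
        let es1 := if i == 0 then es ++ ["L"] else es
        let es2 := if i < width - 2 then es1 ++ ["."] else es1
        if i == width - 1 then es2 ++ ["R"] else es2) elements]) []

-- ===== PORT B =====
def pvRow (left fill right : String) (width : Int) : List String :=
  [left] ++ List.replicate (width - 2).toNat fill ++ [right]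

def build_rect_alt (width : Int) (height : Int) : List (List String) :=
  [pvRow " " "B" " " width]
    ++ List.replicate (height - 2).toNat (pvRow "L" "." "R" width)
    ++ [pvRow " " "T" " " width]

-- ===== PRECONDITION & SPEC =====
-- A's assert raises AssertionError when width < 3 or height < 3; Pre_ is exactly the asserted condition.
def Pre_build_rect (width : Int) (height : Int) : Prop := 3 ≤ width ∧ 3 ≤ height
instance (width : Int) (height : Int) : Decidable (Pre_build_rect width height) := by unfold Pre_build_rect; infer_instance
def pvWitness_build_rect : Int × Int := (4, 3)

def Spec_build_rect (width : Int) (height : Int) (out : List (List String)) : Prop := out = build_rect_alt width height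
instance (width : Int) (height : Int) (out : List (List String)) : Decidable (Spec_build_rect width height out) := by unfold Spec_build_rect; infer_instance

-- ===== CLAIM (what is proved, stated in full; the proofs are below) =====
def Claim_equal_build_rect : Prop := ∀ (width : Int) (height : Int), Dom_build_rect width height → Pre_build_rect width height → Spec_build_rect width height (build_rect width height)

-- ===== LEMMAS AND PROOFS =====

theorem pv_flatMap_const {α β : Type} (g : α → List β) (c : β) :
    ∀ l : List α, (∀ i ∈ l, g i = [c]) → l.flatMap g = List.replicate l.length c := by
  intro l
  induction l with
  | nil => intro _; simp
  | cons x xs ih =>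
      intro h
      simp only [List.flatMap_cons, List.length_cons, List.replicate_succ]
      rw [h x (by simp), ih (fun i hi => h i (by simp [hi]))]
      simp

-- the j==0 / j==height-1 row of A, as a flatMap, equals B's closed-form row
theorem pv_edge_row (c : String) (w : Int) (hw : 3 ≤ w) :
    ((PySem.List.pyRange 0 w 1).flatMap (fun i =>
      if i == 0 then [" "] else if i < w - 1 then [c] else if i == w - 1 then [" "] else []))
    = [" "] ++ List.replicate (w - 2).toNat c ++ [" "] := by
  rw [PySem.List.pyRange_one_append 0 1 w (by omega) (by omega),
      PySem.List.pyRange_one_append 1 (w - 1) w (by omega) (by omega)]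
  have h1 : PySem.List.pyRange 0 1 1 = [0] := PySem.List.pyRange_one_singleton 0
  have h2 : PySem.List.pyRange (w - 1) w 1 = [w - 1] := by
    have := PySem.List.pyRange_one_singleton (w - 1)
    simpa using this
  rw [h1, h2]
  simp only [List.flatMap_append, List.flatMap_cons, List.flatMap_nil]
  rw [pv_flatMap_const _ c _ (fun i hi => by
        rw [PySem.List.mem_pyRange_one] at hi
        have h0 : (i == (0:Int)) = false := by rw [beq_eq_false_iff_ne]; omega
        have hlt : i < w - 1 := hi.2
        simp [h0, hlt])]
  have hne : ((w - 1 : Int) == 0) = false := by rw [beq_eq_false_iff_ne]; omega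
  have hnlt : ¬ (w - 1 < w - 1) := by omega
  have heq : ((w - 1 : Int) == w - 1) = true := by simp
  rw [PySem.List.length_pyRange_one]
  have hml : (w - 1 - 1) = w - 2 := by omega
  simp [hne, hml]

-- an interior row of A, as a flatMap, equals B's closed-form row
theorem pv_mid_row (w : Int) (hw : 3 ≤ w) :
    ((PySem.List.pyRange 0 w 1).flatMap (fun i =>
      (if i == 0 then ["L"] else []) ++ (if i < w - 2 then ["."] else []) ++
      (if i == w - 1 then ["R"] else [])))
    = ["L"] ++ List.replicate (w - 2).toNat "." ++ ["R"] := by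
  rw [PySem.List.pyRange_one_append 0 1 w (by omega) (by omega),
      PySem.List.pyRange_one_append 1 (w - 2) w (by omega) (by omega),
      PySem.List.pyRange_one_append (w - 2) (w - 1) w (by omega) (by omega)]
  have h1 : PySem.List.pyRange 0 1 1 = [0] := PySem.List.pyRange_one_singleton 0
  have h2 : PySem.List.pyRange (w - 2) (w - 1) 1 = [w - 2] := by
    have := PySem.List.pyRange_one_singleton (w - 2)
    simpa [show w - 2 + 1 = w - 1 by omega] using this
  have h3 : PySem.List.pyRange (w - 1) w 1 = [w - 1] := by
    have := PySem.List.pyRange_one_singleton (w - 1)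
    simpa using this
  rw [h1, h2, h3]
  simp only [List.flatMap_append, List.flatMap_cons, List.flatMap_nil]
  rw [pv_flatMap_const _ "." _ (fun i hi => by
        rw [PySem.List.mem_pyRange_one] at hi
        have h0 : (i == (0:Int)) = false := by rw [beq_eq_false_iff_ne]; omega
        have hlt : i < w - 2 := hi.2
        have hne : (i == w - 1) = false := by rw [beq_eq_false_iff_ne]; omega
        simp [h0, hlt, hne])]
  have e0lt : (0 : Int) < w - 2 := by omega
  have e0ne : ((0 : Int) == w - 1) = false := by rw [beq_eq_false_iff_ne]; omega
  have f1 : ((w - 2 : Int) == 0) = false := by rw [beq_eq_false_iff_ne]; omega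
  have f2 : ¬ ((w - 2 : Int) < w - 2) := by omega
  have f3 : ((w - 2 : Int) == w - 1) = false := by rw [beq_eq_false_iff_ne]; omega
  have g1 : ((w - 1 : Int) == 0) = false := by rw [beq_eq_false_iff_ne]; omega
  have g2 : ¬ ((w - 1 : Int) < w - 2) := by omega
  have g3 : ((w - 1 : Int) == w - 1) = true := by simp
  rw [PySem.List.length_pyRange_one]
  have hrep : "." :: List.replicate (w - 2 - 1).toNat "." = List.replicate (w - 2).toNat "." := by
    rw [show (w - 2).toNat = (w - 2 - 1).toNat + 1 from by omega, List.replicate_succ]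
  have e0lt' : (2 : Int) < w := by omega
  simp [e0lt', e0ne, f1, f3, g1, g2, ← hrep]

theorem pv_foldl_if_append {α β : Type} (p : α → Bool) (f g : α → β) :
    ∀ (l : List α) (init : List β),
      l.foldl (fun acc j => if p j then acc ++ [f j] else acc ++ [g j]) init
        = init ++ l.map (fun j => if p j then f j else g j) := by
  intro l
  induction l with
  | nil => intro init; simp
  | cons x xs ih =>
      intro init
      simp only [List.foldl_cons, List.map_cons]
      by_cases hx : p x = true
      · rw [if_pos hx, ih, if_pos hx]; simp
      · rw [if_neg hx, ih, if_neg hx]; simp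

theorem build_rect_spec : Claim_equal_build_rect := by
  intro w h _ hpre
  obtain ⟨hw, hh⟩ := hpre
  show build_rect w h = build_rect_alt w h
  unfold build_rect
  show List.foldl (fun acc j =>
      if j == 0 || j == h - 1 then acc ++ [add_top_bottom_element w j []]
      else acc ++ [(PySem.List.pyRange 0 w 1).foldl (fun es i =>
        let es1 := if i == 0 then es ++ ["L"] else es
        let es2 := if i < w - 2 then es1 ++ ["."] else es1
        if i == w - 1 then es2 ++ ["R"] else es2) []]) [] (PySem.List.pyRange 0 h 1)
    = build_rect_alt w h
  rw [pv_foldl_if_append (fun j => j == 0 || j == h - 1)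
      (fun j => add_top_bottom_element w j [])
      (fun _ => (PySem.List.pyRange 0 w 1).foldl (fun es i =>
        let es1 := if i == 0 then es ++ ["L"] else es
        let es2 := if i < w - 2 then es1 ++ ["."] else es1
        if i == w - 1 then es2 ++ ["R"] else es2) [])]
  rw [List.nil_append,
      PySem.List.pyRange_one_append 0 1 h (by omega) (by omega),
      PySem.List.pyRange_one_append 1 (h - 1) h (by omega) (by omega),
      show PySem.List.pyRange 0 1 1 = [0] by
        simpa using PySem.List.pyRange_one_singleton 0,
      show PySem.List.pyRange (h - 1) h 1 = [h - 1] by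
        simpa using PySem.List.pyRange_one_singleton (h - 1)]
  simp only [List.map_append, List.map_cons, List.map_nil]
  -- top row (j = 0)
  have htop : (if ((0:Int) == 0 || (0:Int) == h - 1 : Bool) then add_top_bottom_element w 0 []
      else (PySem.List.pyRange 0 w 1).foldl (fun es i =>
        let es1 := if i == 0 then es ++ ["L"] else es
        let es2 := if i < w - 2 then es1 ++ ["."] else es1
        if i == w - 1 then es2 ++ ["R"] else es2) []) = pvRow " " "B" " " w := by
    rw [if_pos (show ((0:Int) == 0 || (0:Int) == h - 1) = true from by simp)]
    unfold add_top_bottom_element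
    rw [if_pos (show ((0:Int) == 0) = true from by simp)]
    rw [show (fun (es : List String) (i : Int) =>
          if i == 0 then es ++ [" "]
          else if i < w - 1 then es ++ ["B"]
          else if i == w - 1 then es ++ [" "]
          else es)
        = (fun es i => es ++ (if i == 0 then [" "] else if i < w - 1 then ["B"]
            else if i == w - 1 then [" "] else [])) from by
          funext es i; split_ifs <;> simp]
    rw [PySem.List.foldl_append_eq_flatMap, List.nil_append, pv_edge_row "B" w hw]; rfl
  -- bottom row (j = h - 1)
  have hbot : (if ((h-1:Int) == 0 || (h-1:Int) == h - 1 : Bool) then add_top_bottom_element w (h-1) []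
      else (PySem.List.pyRange 0 w 1).foldl (fun es i =>
        let es1 := if i == 0 then es ++ ["L"] else es
        let es2 := if i < w - 2 then es1 ++ ["."] else es1
        if i == w - 1 then es2 ++ ["R"] else es2) []) = pvRow " " "T" " " w := by
    rw [if_pos (show ((h-1:Int) == 0 || (h-1:Int) == h - 1) = true from by simp)]
    unfold add_top_bottom_element
    rw [if_neg (show ¬ ((h-1:Int) == 0) = true from by simp only [beq_iff_eq]; omega)]
    rw [show (fun (es : List String) (i : Int) =>
          if i == 0 then es ++ [" "]
          else if i < w - 1 then es ++ ["T"]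
          else if i == w - 1 then es ++ [" "]
          else es)
        = (fun es i => es ++ (if i == 0 then [" "] else if i < w - 1 then ["T"]
            else if i == w - 1 then [" "] else [])) from by
          funext es i; split_ifs <;> simp]
    rw [PySem.List.foldl_append_eq_flatMap, List.nil_append, pv_edge_row "T" w hw]; rfl
  -- interior rows (0 < j < h - 1)
  have hmid : ((PySem.List.pyRange 1 (h-1) 1).map (fun j =>
      if (j == 0 || j == h - 1 : Bool) then add_top_bottom_element w j []
      else (PySem.List.pyRange 0 w 1).foldl (fun es i =>
        let es1 := if i == 0 then es ++ ["L"] else es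
        let es2 := if i < w - 2 then es1 ++ ["."] else es1
        if i == w - 1 then es2 ++ ["R"] else es2) []))
      = List.replicate (h - 2).toNat (pvRow "L" "." "R" w) := by
    have hval : ∀ j ∈ PySem.List.pyRange 1 (h-1) 1,
        (if (j == 0 || j == h - 1 : Bool) then add_top_bottom_element w j []
          else (PySem.List.pyRange 0 w 1).foldl (fun es i =>
            let es1 := if i == 0 then es ++ ["L"] else es
            let es2 := if i < w - 2 then es1 ++ ["."] else es1
            if i == w - 1 then es2 ++ ["R"] else es2) []) = pvRow "L" "." "R" w := by
      intro j hj
      rw [PySem.List.mem_pyRange_one] at hj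
      rw [if_neg (show ¬ (j == 0 || j == h - 1) = true from by
            simp only [Bool.or_eq_true, beq_iff_eq]; omega)]
      rw [show (fun (es : List String) (i : Int) =>
            let es1 := if i == 0 then es ++ ["L"] else es
            let es2 := if i < w - 2 then es1 ++ ["."] else es1
            if i == w - 1 then es2 ++ ["R"] else es2)
          = (fun es i => es ++ ((if i == 0 then ["L"] else []) ++ (if i < w - 2 then ["."] else []) ++
              (if i == w - 1 then ["R"] else []))) from by
            funext es i; split_ifs <;> simp]
      rw [PySem.List.foldl_append_eq_flatMap, List.nil_append, pv_mid_row w hw]; rfl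
    calc (PySem.List.pyRange 1 (h-1) 1).map _
        = (PySem.List.pyRange 1 (h-1) 1).map (fun _ => pvRow "L" "." "R" w) :=
          List.map_congr_left hval
      _ = List.replicate (h - 2).toNat (pvRow "L" "." "R" w) := by
          rw [List.map_const']
          congr 1
          rw [PySem.List.length_pyRange_one]
          omega
  rw [htop, hbot, hmid]
  rfl
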